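-- pv_equiv track=rewrite | github.com/newtest2354-commits/wav | geoip_classifier.py | categorize_by_protocol
-- ===== SOURCE A (Python) =====
-- def categorize_by_protocol(configs):
--     categories = {
--         'vmess': [], 'vless': [], 'trojan': [], 'shadowsocks': [],
--         'hysteria': [], 'hysteria2': [], 'tuic': [], 'wireguard': [], 'other': []
--     }
--
--     for config in configs:
--         if config.startswith('vmess://'):
--             categories['vmess'].append(config)
--         elif config.startswith('vless://'):
--             categories['vless'].append(config)
--         elif config.startswith('trojan://'):
--             categories['trojan'].append(config)
--         elif config.startswith('ss://'):
--             categories['shadowsocks'].append(config)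
--         elif config.startswith('hysteria2://') or config.startswith('hy2://'):
--             categories['hysteria2'].append(config)
--         elif config.startswith('hysteria://'):
--             categories['hysteria'].append(config)
--         elif config.startswith('tuic://'):
--             categories['tuic'].append(config)
--         elif config.startswith('wireguard://'):
--             categories['wireguard'].append(config)
--         else:
--             categories['other'].append(config)
--
--     return categories
-- ===== SOURCE B (Python) =====
-- _SCHEME_MAP = {
--     'vmess': 'vmess', 'vless': 'vless', 'trojan': 'trojan', 'ss': 'shadowsocks',
--     'hysteria2': 'hysteria2', 'hy2': 'hysteria2', 'hysteria': 'hysteria',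
--     'tuic': 'tuic', 'wireguard': 'wireguard',
-- }
--
-- _CATEGORY_NAMES = ('vmess', 'vless', 'trojan', 'shadowsocks',
--                    'hysteria', 'hysteria2', 'tuic', 'wireguard', 'other')
--
--
-- def categorize_by_protocol(configs):
--     categories = {name: [] for name in _CATEGORY_NAMES}
--     for config in configs:
--         scheme, sep, _rest = config.partition('://')
--         key = _SCHEME_MAP.get(scheme, 'other') if sep else 'other'
--         categories[key].append(config)
--     return categories
-- ===== Notes on version B (the rewrite author's own statement) =====
-- stated objective: idiomatic
-- what changed: Replaces the ordered startswith cascade with one partition on '://' plus a scheme-to-category dict lookup per config.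
import Mathlib
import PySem

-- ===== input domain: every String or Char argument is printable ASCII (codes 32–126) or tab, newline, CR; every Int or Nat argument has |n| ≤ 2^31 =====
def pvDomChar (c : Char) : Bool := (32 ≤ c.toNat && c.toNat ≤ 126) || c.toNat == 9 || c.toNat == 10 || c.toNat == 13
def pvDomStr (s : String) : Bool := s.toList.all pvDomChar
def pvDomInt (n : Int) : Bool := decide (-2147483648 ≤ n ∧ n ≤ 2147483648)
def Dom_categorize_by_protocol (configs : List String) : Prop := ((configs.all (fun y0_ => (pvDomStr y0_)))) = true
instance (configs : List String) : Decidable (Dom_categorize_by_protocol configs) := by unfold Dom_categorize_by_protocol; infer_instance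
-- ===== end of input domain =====

-- B replaces A's ordered startswith cascade by one partition on "://" plus a scheme→category
-- dict lookup (idiomatic; return value only, no observable mutation).

-- ===== PORT A =====
def categorize_by_protocol (configs : List String) : List (String × List String) :=
  let categories : PySem.Dict String (List String) :=
    PySem.Dict.ofList [("vmess", []), ("vless", []), ("trojan", []), ("shadowsocks", []),
      ("hysteria", []), ("hysteria2", []), ("tuic", []), ("wireguard", []), ("other", [])]
  (configs.foldl (fun cats config =>
    if PySem.Str.startswith config "vmess://" then cats.modify "vmess" [] (· ++ [config])
    else if PySem.Str.startswith config "vless://" then cats.modify "vless" [] (· ++ [config])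
    else if PySem.Str.startswith config "trojan://" then cats.modify "trojan" [] (· ++ [config])
    else if PySem.Str.startswith config "ss://" then cats.modify "shadowsocks" [] (· ++ [config])
    else if PySem.Str.startswith config "hysteria2://" || PySem.Str.startswith config "hy2://" then
      cats.modify "hysteria2" [] (· ++ [config])
    else if PySem.Str.startswith config "hysteria://" then cats.modify "hysteria" [] (· ++ [config])
    else if PySem.Str.startswith config "tuic://" then cats.modify "tuic" [] (· ++ [config])
    else if PySem.Str.startswith config "wireguard://" then cats.modify "wireguard" [] (· ++ [config])
    else cats.modify "other" [] (· ++ [config])) categories).items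

-- ===== PORT B =====
def pvSchemeMap : PySem.Dict String String :=
  PySem.Dict.ofList [("vmess", "vmess"), ("vless", "vless"), ("trojan", "trojan"),
    ("ss", "shadowsocks"), ("hysteria2", "hysteria2"), ("hy2", "hysteria2"),
    ("hysteria", "hysteria"), ("tuic", "tuic"), ("wireguard", "wireguard")]

def pvCategoryNames : List String :=
  ["vmess", "vless", "trojan", "shadowsocks", "hysteria", "hysteria2", "tuic", "wireguard", "other"]

-- str.partition(sep) ported by hand via PySem.Str.find/slice (exact: first occurrence,
-- (s, '', '') when sep is absent)
def pvPartition (s sep : String) : String × String × String :=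
  let i := PySem.Str.find s sep
  if i = -1 then (s, "", "")
  else (PySem.Str.slice s (some 0) (some i), sep,
        PySem.Str.slice s (some (i + (sep.length : Int))) none)

def categorize_by_protocol_alt (configs : List String) : List (String × List String) :=
  let categories : PySem.Dict String (List String) :=
    PySem.Dict.ofList (pvCategoryNames.map (fun name => (name, [])))
  (configs.foldl (fun cats config =>
    let p := pvPartition config "://"
    let key := if p.2.1 ≠ "" then pvSchemeMap.getD p.1 "other" else "other"
    cats.modify key [] (· ++ [config])) categories).items

-- ===== PRECONDITION & SPEC =====
def Spec_categorize_by_protocol (configs : List String) (out : List (String × List String)) : Prop := out = categorize_by_protocol_alt configs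
instance (configs : List String) (out : List (String × List String)) : Decidable (Spec_categorize_by_protocol configs out) := by unfold Spec_categorize_by_protocol; infer_instance

-- ===== CLAIM (what is proved, stated in full; the proofs are below) =====
def Claim_equal_categorize_by_protocol : Prop := ∀ (configs : List String), Dom_categorize_by_protocol configs → Spec_categorize_by_protocol configs (categorize_by_protocol configs)

-- ===== LEMMAS AND PROOFS =====

-- B's per-config category key, as a standalone function (definitionaly B's key expression)
def pvKeyB (config : String) : String :=
  let p := pvPartition config "://"
  if p.2.1 ≠ "" then pvSchemeMap.getD p.1 "other" else "other"

-- A's per-config category key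
def pvKeyA (config : String) : String :=
  if PySem.Str.startswith config "vmess://" then "vmess"
  else if PySem.Str.startswith config "vless://" then "vless"
  else if PySem.Str.startswith config "trojan://" then "trojan"
  else if PySem.Str.startswith config "ss://" then "shadowsocks"
  else if PySem.Str.startswith config "hysteria2://" || PySem.Str.startswith config "hy2://" then "hysteria2"
  else if PySem.Str.startswith config "hysteria://" then "hysteria"
  else if PySem.Str.startswith config "tuic://" then "tuic"
  else if PySem.Str.startswith config "wireguard://" then "wireguard"
  else "other"

theorem pv_crux (w s : List Char) (hw : (':' : Char) ∉ w) :
    PySem.Chars.startswith s (w ++ [':', '/', '/']) = true ↔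
      0 ≤ PySem.Chars.find s [':', '/', '/'] ∧
        s.take (PySem.Chars.find s [':', '/', '/']).toNat = w := by
  rw [PySem.Chars.startswith_iff]
  constructor
  · intro h
    have hinf : [':', '/', '/'] <:+: s := by
      obtain ⟨t, ht⟩ := h
      exact ⟨w, t, by simpa using ht⟩
    have hnn : 0 ≤ PySem.Chars.find s [':', '/', '/'] :=
      (PySem.Chars.find_nonneg_iff s [':', '/', '/']).2 hinf
    obtain ⟨hpre, hmin⟩ := PySem.Chars.find_spec hnn
    set i := (PySem.Chars.find s [':', '/', '/']).toNat with hi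
    obtain ⟨t, ht⟩ := h
    have hdropw : s.drop w.length = ':' :: '/' :: '/' :: t := by
      rw [← ht]; simp
    have hle : i ≤ w.length := by
      by_contra hlt
      exact hmin w.length (by omega) ⟨t, by simpa using hdropw.symm⟩
    have hwp : w <+: s := ⟨':' :: '/' :: '/' :: t, by simpa using ht⟩
    have hieq : i = w.length := by
      by_contra hne
      have hilt : i < w.length := by omega
      have hcol : s[i]? = some ':' := by
        obtain ⟨t', ht'⟩ := hpre
        have : s[i]? = (s.drop i)[0]? := by
          simp [List.getElem?_drop]
        rw [this, ← ht']
        rfl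
      have hwi : s[i]? = some w[i] := by
        obtain ⟨t', ht'⟩ := hwp
        rw [← ht']
        simp [List.getElem?_append, hilt]
      have : w[i] = ':' := by exact (Option.some.inj ((hwi.symm.trans hcol)))
      exact hw (this ▸ List.getElem_mem hilt)
    refine ⟨hnn, ?_⟩
    rw [hieq, ← ht, List.append_assoc, List.take_left]
  · rintro ⟨hnn, htake⟩
    obtain ⟨hpre, -⟩ := PySem.Chars.find_spec hnn
    obtain ⟨t, ht⟩ := hpre
    refine ⟨t, ?_⟩
    calc w ++ [':', '/', '/'] ++ t
        = s.take (PySem.Chars.find s [':', '/', '/']).toNat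
            ++ s.drop (PySem.Chars.find s [':', '/', '/']).toNat := by
          rw [htake, ← ht]; simp
      _ = s := List.take_append_drop _ _

theorem pv_key_eq (config : String) : pvKeyA config = pvKeyB config := by
  unfold pvKeyA pvKeyB pvPartition
  by_cases hi : PySem.Str.find config "://" = -1
  · have hninf : ¬ ([':', '/', '/'] <:+: config.toList) := by
      have h := (PySem.Str.find_eq_neg_one_iff (s := config) (sub := "://")).1 hi
      simpa using h
    have hsw : ∀ (w : List Char), PySem.Chars.startswith config.toList (w ++ [':', '/', '/']) = false := by
      intro w
      rw [Bool.eq_false_iff, Ne, PySem.Chars.startswith_iff]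
      rintro ⟨t, ht⟩
      exact hninf ⟨w, t, by simpa using ht⟩
    have e1 : ("vmess://" : String).toList = "vmess".toList ++ [':', '/', '/'] := by decide
    have e2 : ("vless://" : String).toList = "vless".toList ++ [':', '/', '/'] := by decide
    have e3 : ("trojan://" : String).toList = "trojan".toList ++ [':', '/', '/'] := by decide
    have e4 : ("ss://" : String).toList = "ss".toList ++ [':', '/', '/'] := by decide
    have e5 : ("hysteria2://" : String).toList = "hysteria2".toList ++ [':', '/', '/'] := by decide
    have e6 : ("hy2://" : String).toList = "hy2".toList ++ [':', '/', '/'] := by decide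
    have e7 : ("hysteria://" : String).toList = "hysteria".toList ++ [':', '/', '/'] := by decide
    have e8 : ("tuic://" : String).toList = "tuic".toList ++ [':', '/', '/'] := by decide
    have e9 : ("wireguard://" : String).toList = "wireguard".toList ++ [':', '/', '/'] := by decide
    simp only [PySem.Str.startswith_eq, e1, e2, e3, e4, e5, e6, e7, e8, e9, hsw, hi,
      if_pos, Bool.false_or]
    simp
  · have hnn : 0 ≤ PySem.Str.find config "://" := by
      have h1 := PySem.Chars.neg_one_le_find (s := config.toList) (sub := [':', '/', '/'])
      have h2 : PySem.Str.find config "://" = PySem.Chars.find config.toList [':', '/', '/'] := by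
        simp
      omega
    have hnnC : 0 ≤ PySem.Chars.find config.toList [':', '/', '/'] := by simpa using hnn
    have hkey : ∀ (w : List Char), (':' : Char) ∉ w →
        (PySem.Chars.startswith config.toList (w ++ [':', '/', '/']) = true ↔
          config.toList.take (PySem.Chars.find config.toList [':', '/', '/']).toNat = w) := by
      intro w hw
      rw [pv_crux _ _ hw]
      exact ⟨fun h => h.2, fun h => ⟨hnnC, h⟩⟩
    have hfind : PySem.Str.find config "://" = PySem.Chars.find config.toList [':', '/', '/'] := by
      simp
    have hS : (PySem.Str.slice config (some 0) (some (PySem.Str.find config "://"))).toList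
        = config.toList.take (PySem.Chars.find config.toList [':', '/', '/']).toNat := by
      rw [PySem.Str.toList_slice, hfind]
      simp only [PySem.Chars.slice_eq_listSlice, PySem.List.slice_zero_start]
      rw [PySem.List.slice_to _ hnnC]
    have e1 : ("vmess://" : String).toList = "vmess".toList ++ [':', '/', '/'] := by decide
    have e2 : ("vless://" : String).toList = "vless".toList ++ [':', '/', '/'] := by decide
    have e3 : ("trojan://" : String).toList = "trojan".toList ++ [':', '/', '/'] := by decide
    have e4 : ("ss://" : String).toList = "ss".toList ++ [':', '/', '/'] := by decide
    have e5 : ("hysteria2://" : String).toList = "hysteria2".toList ++ [':', '/', '/'] := by decide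
    have e6 : ("hy2://" : String).toList = "hy2".toList ++ [':', '/', '/'] := by decide
    have e7 : ("hysteria://" : String).toList = "hysteria".toList ++ [':', '/', '/'] := by decide
    have e8 : ("tuic://" : String).toList = "tuic".toList ++ [':', '/', '/'] := by decide
    have e9 : ("wireguard://" : String).toList = "wireguard".toList ++ [':', '/', '/'] := by decide
    have k1 := hkey "vmess".toList (by decide)
    have k2 := hkey "vless".toList (by decide)
    have k3 := hkey "trojan".toList (by decide)
    have k4 := hkey "ss".toList (by decide)
    have k5 := hkey "hysteria2".toList (by decide)
    have k6 := hkey "hy2".toList (by decide)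
    have k7 := hkey "hysteria".toList (by decide)
    have k8 := hkey "tuic".toList (by decide)
    have k9 := hkey "wireguard".toList (by decide)
    have hEq : ∀ (w : String), (PySem.Str.slice config (some 0) (some (PySem.Str.find config "://")) = w)
        ↔ (config.toList.take (PySem.Chars.find config.toList [':', '/', '/']).toNat = w.toList) := by
      intro w
      rw [← String.toList_inj, hS]
    simp only [Bool.or_eq_true, PySem.Str.startswith_eq, e1, e2, e3, e4, e5, e6, e7, e8, e9,
      k1, k2, k3, k4, k5, k6, k7, k8, k9, if_neg hi]
    simp only [PySem.Dict.getD, ne_eq]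
    rw [if_pos (by decide : ¬("://" : String) = "")]
    have hmap : pvSchemeMap = PySem.Dict.mk [("vmess", "vmess"), ("vless", "vless"),
        ("trojan", "trojan"), ("ss", "shadowsocks"), ("hysteria2", "hysteria2"),
        ("hy2", "hysteria2"), ("hysteria", "hysteria"), ("tuic", "tuic"),
        ("wireguard", "wireguard")] := by decide
    rw [hmap]
    have hEq' : ∀ (w : String), (w = PySem.Str.slice config (some 0) (some (PySem.Str.find config "://")))
        ↔ (config.toList.take (PySem.Chars.find config.toList [':', '/', '/']).toNat = w.toList) := by
      intro w; rw [eq_comm, hEq]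
    simp only [PySem.Dict.get?_mk_cons, beq_iff_eq, hEq']
    clear hkey hfind hS e1 e2 e3 e4 e5 e6 e7 e8 e9 k1 k2 k3 k4 k5 k6 k7 k8 k9 hEq hEq' hi hnn hnnC hmap
    generalize config.toList.take (PySem.Chars.find config.toList [':', '/', '/']).toNat = t
    split_ifs <;> simp_all [PySem.Dict.get?]

theorem pv_step (cats : PySem.Dict String (List String)) (config : String) :
    (if PySem.Str.startswith config "vmess://" then cats.modify "vmess" [] (· ++ [config])
     else if PySem.Str.startswith config "vless://" then cats.modify "vless" [] (· ++ [config])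
     else if PySem.Str.startswith config "trojan://" then cats.modify "trojan" [] (· ++ [config])
     else if PySem.Str.startswith config "ss://" then cats.modify "shadowsocks" [] (· ++ [config])
     else if PySem.Str.startswith config "hysteria2://" || PySem.Str.startswith config "hy2://" then
       cats.modify "hysteria2" [] (· ++ [config])
     else if PySem.Str.startswith config "hysteria://" then cats.modify "hysteria" [] (· ++ [config])
     else if PySem.Str.startswith config "tuic://" then cats.modify "tuic" [] (· ++ [config])
     else if PySem.Str.startswith config "wireguard://" then cats.modify "wireguard" [] (· ++ [config])
     else cats.modify "other" [] (· ++ [config])) =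
    (let p := pvPartition config "://"
     let key := if p.2.1 ≠ "" then pvSchemeMap.getD p.1 "other" else "other"
     cats.modify key [] (· ++ [config])) := by
  show _ = cats.modify (pvKeyB config) [] (· ++ [config])
  rw [← pv_key_eq]
  unfold pvKeyA
  split_ifs <;> rfl

theorem categorize_by_protocol_spec' (configs : List String) :
    categorize_by_protocol configs = categorize_by_protocol_alt configs := by
  unfold categorize_by_protocol categorize_by_protocol_alt
  dsimp only
  congr 1
  congr 1
  funext cats config
  exact pv_step cats config

-- ===== VERDICT (by name: the statement is the Claim_ definition above) =====
theorem categorize_by_protocol_spec : Claim_equal_categorize_by_protocol := by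
  intro configs _
  exact categorize_by_protocol_spec' configs
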